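-- pv_equiv track=rewrite | github.com/jswanson3323/SmartRouter | custom_components/catalog_conversation_router/matcher.py | _find_subsequence_span
-- ===== SOURCE A (Python) =====
-- def _find_subsequence_span(
--
--     utterance_tokens: list[str],
--     pattern_tokens: list[str],
--     start_index: int,
-- ) -> tuple[int, int] | None:
--     """Find the first ordered subsequence span for pattern tokens."""
--     if not pattern_tokens:
--         return (start_index, start_index)
--
--     first_index: int | None = None
--     current_index = start_index
--     for pattern_token in pattern_tokens:
--         while current_index < len(utterance_tokens) and utterance_tokens[current_index] != pattern_token:
--             current_index += 1
--         if current_index >= len(utterance_tokens):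
--             return None
--         if first_index is None:
--             first_index = current_index
--         current_index += 1
--
--     return (first_index if first_index is not None else start_index, current_index)
-- ===== SOURCE B (Python) =====
-- def _find_subsequence_span(
--     utterance_tokens: list[str],
--     pattern_tokens: list[str],
--     start_index: int,
-- ):
--     """Single pass over the utterance with a pattern pointer."""
--     if not pattern_tokens:
--         return (start_index, start_index)
--     p = 0
--     first_index = 0
--     for i in range(start_index, len(utterance_tokens)):
--         if utterance_tokens[i] == pattern_tokens[p]:
--             if p == 0:
--                 first_index = i
--             p += 1
--             if p == len(pattern_tokens):
--                 return (first_index, i + 1)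
--     return None
-- ===== Notes on version B (the rewrite author's own statement) =====
-- stated objective: simpler
-- what changed: Replaced the nested outer-over-pattern loop with an inner while scan by a single for-loop over utterance indices from start_index, advancing a pattern pointer p and returning (first_index, i+1) when p exhausts the pattern.
import Mathlib
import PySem

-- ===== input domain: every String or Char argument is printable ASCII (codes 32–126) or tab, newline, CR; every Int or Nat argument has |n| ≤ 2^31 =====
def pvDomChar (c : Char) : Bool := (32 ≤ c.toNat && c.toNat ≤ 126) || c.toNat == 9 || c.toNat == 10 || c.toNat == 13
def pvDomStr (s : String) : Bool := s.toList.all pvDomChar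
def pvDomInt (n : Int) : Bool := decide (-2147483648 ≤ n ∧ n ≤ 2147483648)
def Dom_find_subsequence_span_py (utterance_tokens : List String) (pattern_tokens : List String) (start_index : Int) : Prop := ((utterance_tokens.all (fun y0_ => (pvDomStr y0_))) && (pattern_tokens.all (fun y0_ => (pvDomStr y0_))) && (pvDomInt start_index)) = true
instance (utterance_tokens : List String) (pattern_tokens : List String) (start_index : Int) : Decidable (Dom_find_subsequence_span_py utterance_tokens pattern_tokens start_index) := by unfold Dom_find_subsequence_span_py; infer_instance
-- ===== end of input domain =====

-- B replaces A's nested pattern-loop-with-inner-while by a single index loop over the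
-- utterance with a pattern pointer; objective: simpler (one loop, no nesting).

-- ===== PORT A =====
-- the inner 'while current_index < len(...) and utterance_tokens[current_index] != pattern_token'.
-- Returns none exactly where Python would raise IndexError (excluded by Pre_).
def pvA_while (utt : List String) (tok : String) (cur : Int) : Option Int :=
  if _h : cur < (utt.length : Int) then
    match PySem.List.pyGet? utt cur with
    | none => none
    | some x => if x ≠ tok then pvA_while utt tok (cur + 1) else some cur
  else some cur
termination_by ((utt.length : Int) - cur).toNat
decreasing_by omega

-- the 'for pattern_token in pattern_tokens' loop, state = (first_index, current_index)
def pvA_for (utt : List String) (pats : List String) (start : Int) (first : Option Int) (cur : Int) : Option (Int × Int) :=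
  match pats with
  | [] => some (first.getD start, cur)
  | t :: rest =>
    match pvA_while utt t cur with
    | none => none
    | some c =>
      if (utt.length : Int) ≤ c then none
      else pvA_for utt rest start (if first = none then some c else first) (c + 1)

def find_subsequence_span_py (utterance_tokens : List String) (pattern_tokens : List String) (start_index : Int) : Option (Int × Int) :=
  if pattern_tokens = [] then some (start_index, start_index)
  else pvA_for utterance_tokens pattern_tokens start_index none start_index

-- ===== PORT B =====
-- 'for i in range(start_index, len(utterance_tokens))' with pattern pointer p.
-- pyGet? utt i = none is Python's IndexError (excluded by Pre_); p is a Nat counter, always in range.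
def pvB_loop (utt : List String) (pat : List String) (idxs : List Int) (p : Nat) (first : Int) : Option (Int × Int) :=
  match idxs with
  | [] => none
  | i :: rest =>
    match PySem.List.pyGet? utt i, pat[p]? with
    | some x, some t =>
      if x = t then
        let first' := if p = 0 then i else first
        if p + 1 = pat.length then some (first', i + 1)
        else pvB_loop utt pat rest (p + 1) first'
      else pvB_loop utt pat rest p first
    | _, _ => none

def find_subsequence_span_py_alt (utterance_tokens : List String) (pattern_tokens : List String) (start_index : Int) : Option (Int × Int) :=
  if pattern_tokens = [] then some (start_index, start_index)
  else pvB_loop utterance_tokens pattern_tokens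
        (PySem.List.pyRange start_index (utterance_tokens.length : Int) 1) 0 0

-- ===== PRECONDITION & SPEC =====
-- Pre_ excludes exactly the inputs where Python A raises IndexError: a nonempty pattern with
-- start_index below -len(utterance_tokens) (negative-index underflow on the first access).
def Pre_find_subsequence_span_py (utterance_tokens : List String) (pattern_tokens : List String) (start_index : Int) : Prop :=
  pattern_tokens = [] ∨ -(utterance_tokens.length : Int) ≤ start_index
instance (utterance_tokens : List String) (pattern_tokens : List String) (start_index : Int) : Decidable (Pre_find_subsequence_span_py utterance_tokens pattern_tokens start_index) := by unfold Pre_find_subsequence_span_py; infer_instance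

def pvWitness_find_subsequence_span_py : List String × List String × Int := (["hey", "turn", "on", "the", "light"], ["turn", "light"], 0)

def Spec_find_subsequence_span_py (utterance_tokens : List String) (pattern_tokens : List String) (start_index : Int) (out : Option (Int × Int)) : Prop := out = find_subsequence_span_py_alt utterance_tokens pattern_tokens start_index
instance (utterance_tokens : List String) (pattern_tokens : List String) (start_index : Int) (out : Option (Int × Int)) : Decidable (Spec_find_subsequence_span_py utterance_tokens pattern_tokens start_index out) := by unfold Spec_find_subsequence_span_py; infer_instance

-- ===== CLAIM (what is proved, stated in full; the proofs are below) =====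
def Claim_equal_find_subsequence_span_py : Prop := ∀ (utterance_tokens : List String) (pattern_tokens : List String) (start_index : Int), Dom_find_subsequence_span_py utterance_tokens pattern_tokens start_index → Pre_find_subsequence_span_py utterance_tokens pattern_tokens start_index → Spec_find_subsequence_span_py utterance_tokens pattern_tokens start_index (find_subsequence_span_py utterance_tokens pattern_tokens start_index)

-- ===== LEMMAS AND PROOFS =====

-- Core invariant: A's remaining-pattern loop from position p equals B's index loop with
-- pointer p, provided the first-match bookkeeping agrees (first = none ↔ p = 0) and the
-- cursor never underflows (-len ≤ cur), so every access succeeds.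
theorem pvAB_loop_eq (utt pat : List String) (start : Int) :
    ∀ (cur : Int) (p : Nat) (firstA : Option Int) (firstB : Int),
      -(utt.length : Int) ≤ cur → p < pat.length →
      (p = 0 → firstA = none) → (p ≠ 0 → firstA = some firstB) →
      pvA_for utt (pat.drop p) start firstA cur
        = pvB_loop utt pat (PySem.List.pyRange cur (utt.length : Int) 1) p firstB := by
  intro cur
  induction hfuel : ((utt.length : Int) - cur).toNat generalizing cur with
  | zero =>
    intro p firstA firstB _hlo hp _ _
    have hge : (utt.length : Int) ≤ cur := by omega
    rw [PySem.List.pyRange_one_eq_nil hge]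
    rw [List.drop_eq_getElem_cons hp]
    simp only [pvA_for, pvB_loop]
    rw [show pvA_while utt pat[p] cur = some cur from by
      rw [pvA_while]; rw [dif_neg (by omega)]]
    simp [hge]
  | succ n ih =>
    intro p firstA firstB hlo hp hA0 hAB
    have hlt : cur < (utt.length : Int) := by omega
    obtain ⟨x, hx⟩ : ∃ x, PySem.List.pyGet? utt cur = some x := by
      cases hg : PySem.List.pyGet? utt cur with
      | some x => exact ⟨x, rfl⟩
      | none =>
        rw [PySem.List.pyGet?_eq_none_iff] at hg
        exact absurd (by unfold PySem.Raise.InRange; omega) hg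
    have hdrop : pat.drop p = pat[p] :: pat.drop (p + 1) := List.drop_eq_getElem_cons hp
    rw [PySem.List.pyRange_one_cons hlt, hdrop]
    by_cases hxt : x = pat[p]
    · -- match at index cur
      -- A side: the inner while stops immediately at cur
      have hwhile : pvA_while utt pat[p] cur = some cur := by
        rw [pvA_while, dif_pos hlt, hx]; simp [hxt]
      simp only [pvA_for, pvB_loop, hwhile, hx, List.getElem?_eq_getElem hp]
      rw [if_neg (by omega), if_pos hxt]
      by_cases hlast : p + 1 = pat.length
      · -- pattern exhausted: both return the span
        have : pat.drop (p + 1) = [] := by rw [List.drop_eq_nil_iff]; omega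
        rw [this]
        simp only [pvA_for, if_pos hlast]
        by_cases hp0 : p = 0
        · rw [hA0 hp0]; simp [hp0]
        · rw [hAB hp0]; simp [hp0]
      · -- advance both the cursor and the pattern pointer
        rw [if_neg hlast]
        have hfuel' : ((utt.length : Int) - (cur + 1)).toNat = n := by omega
        have hstep := ih (cur + 1) hfuel' (p + 1)
          (if firstA = none then some cur else firstA)
          (if p = 0 then cur else firstB)
          (by omega) (by omega) (by omega)
          (fun _ => by
            by_cases hp0 : p = 0
            · rw [hA0 hp0]; simp [hp0]
            · rw [hAB hp0]; simp [hp0])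
        exact hstep
    · -- mismatch: A's while skips cur, B's loop moves to the next index
      have hwhile : pvA_while utt pat[p] cur = pvA_while utt pat[p] (cur + 1) := by
        rw [pvA_while, dif_pos hlt, hx]; simp [hxt]
      have hfuel' : ((utt.length : Int) - (cur + 1)).toNat = n := by omega
      have hstep := ih (cur + 1) hfuel' p firstA firstB (by omega) hp hA0 hAB
      rw [hdrop] at hstep
      simp only [pvA_for, pvB_loop, hwhile, hx, List.getElem?_eq_getElem hp,
        if_neg hxt] at hstep ⊢
      exact hstep

theorem find_subsequence_span_py_spec : Claim_equal_find_subsequence_span_py := by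
  intro utt pat start _hDom hPre
  unfold Spec_find_subsequence_span_py find_subsequence_span_py find_subsequence_span_py_alt
  by_cases hp : pat = []
  · simp [hp]
  · simp only [hp, if_false]
    have hlen : 0 < pat.length := List.length_pos_of_ne_nil hp
    have hcur : -(utt.length : Int) ≤ start := by
      rcases hPre with h | h
      · exact absurd h hp
      · exact h
    have := pvAB_loop_eq utt pat start start 0 none 0 hcur hlen (fun _ => rfl) (fun h => absurd rfl h)
    simpa using this
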